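-- pv_equiv track=rewrite | github.com/timmaaaz/ichor | scripts/extract_test_failures.py | extract_first_error
-- ===== SOURCE A (Python) =====
-- def extract_first_error(lines: list) -> str:
--     """Extract the first meaningful error line for the SUMMARY.md index."""
--     signals = ["DIFF", "Error", "panic:", "Should receive", "expected",
--                "status code", "cannot", "undefined", "unexpected error"]
--     for line in lines:
--         if any(s in line for s in signals):
--             return line.strip()[:100]
--     for line in lines:
--         if line.strip():
--             return line.strip()[:100]
--     return "(see file for details)"
-- ===== SOURCE B (Python) =====
-- def extract_first_error(lines: list) -> str:
--     """Single pass: return on first signal match, remembering the first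
--     non-empty line as a fallback."""
--     signals = ["DIFF", "Error", "panic:", "Should receive", "expected",
--                "status code", "cannot", "undefined", "unexpected error"]
--     fallback = None
--     for line in lines:
--         if any(s in line for s in signals):
--             return line.strip()[:100]
--         if fallback is None and line.strip():
--             fallback = line.strip()[:100]
--     return fallback if fallback is not None else "(see file for details)"
-- ===== Notes on version B (the rewrite author's own statement) =====
-- stated objective: simpler
-- what changed: Replaces A's two sequential scans over the lines with one loop that returns immediately on a signal match and carries the first non-empty stripped line as a fallback accumulator.
import Mathlib
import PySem

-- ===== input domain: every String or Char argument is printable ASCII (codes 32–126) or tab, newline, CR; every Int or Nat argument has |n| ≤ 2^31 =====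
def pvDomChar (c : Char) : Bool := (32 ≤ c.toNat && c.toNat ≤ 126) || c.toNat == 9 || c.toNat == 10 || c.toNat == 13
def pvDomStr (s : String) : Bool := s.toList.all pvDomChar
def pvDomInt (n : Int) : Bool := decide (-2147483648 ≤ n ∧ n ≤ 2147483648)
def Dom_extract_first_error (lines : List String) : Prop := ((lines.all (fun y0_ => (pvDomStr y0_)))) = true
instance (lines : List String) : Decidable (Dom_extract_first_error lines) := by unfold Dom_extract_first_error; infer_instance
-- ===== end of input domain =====

-- B merges A's two sequential scans into one loop with a fallback accumulator (objective: simpler).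

-- ===== PORT A =====
def efeSignals : List String :=
  ["DIFF", "Error", "panic:", "Should receive", "expected",
   "status code", "cannot", "undefined", "unexpected error"]

-- line.strip()[:100]
def efeTrunc (line : String) : String :=
  PySem.Str.slice (PySem.Str.strip line) none (some 100)

-- first loop of A: first line containing any signal
def efeLoop1 : List String → Option String
  | [] => none
  | line :: rest =>
    if efeSignals.any (fun s => PySem.Str.isIn s line) then some (efeTrunc line)
    else efeLoop1 rest

-- second loop of A: first line whose strip is truthy
def efeLoop2 : List String → Option String
  | [] => none
  | line :: rest =>
    if PySem.Str.strip line = "" then efeLoop2 rest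
    else some (efeTrunc line)

def extract_first_error (lines : List String) : String :=
  match efeLoop1 lines with
  | some r => r
  | none =>
    match efeLoop2 lines with
    | some r => r
    | none => "(see file for details)"

-- ===== PORT B =====
def efbSignals : List String :=
  ["DIFF", "Error", "panic:", "Should receive", "expected",
   "status code", "cannot", "undefined", "unexpected error"]

-- B's single loop over the lines, carrying the fallback accumulator
def efbGo : List String → Option String → String
  | [], fallback =>
    match fallback with
    | some f => f
    | none => "(see file for details)"
  | line :: rest, fallback =>
    if efbSignals.any (fun s => PySem.Str.isIn s line) then
      PySem.Str.slice (PySem.Str.strip line) none (some 100)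
    else if fallback.isNone && !(PySem.Str.strip line = "") then
      efbGo rest (some (PySem.Str.slice (PySem.Str.strip line) none (some 100)))
    else
      efbGo rest fallback

def extract_first_error_alt (lines : List String) : String :=
  efbGo lines none

-- ===== PRECONDITION & SPEC =====
def Spec_extract_first_error (lines : List String) (out : String) : Prop := out = extract_first_error_alt lines
instance (lines : List String) (out : String) : Decidable (Spec_extract_first_error lines out) := by unfold Spec_extract_first_error; infer_instance

-- ===== CLAIM (what is proved, stated in full; the proofs are below) =====
def Claim_equal_extract_first_error : Prop := ∀ (lines : List String), Dom_extract_first_error lines → Spec_extract_first_error lines (extract_first_error lines)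

-- ===== LEMMAS AND PROOFS =====

-- loop invariant: B's single pass equals A's first scan, falling back to the
-- accumulator (if set) and otherwise to A's second scan
theorem efbGo_eq (lines : List String) :
    ∀ fb : Option String, efbGo lines fb =
      match efeLoop1 lines with
      | some r => r
      | none =>
        match fb with
        | some f => f
        | none =>
          match efeLoop2 lines with
          | some r => r
          | none => "(see file for details)" := by
  induction lines with
  | nil => intro fb; cases fb <;> simp [efbGo, efeLoop1, efeLoop2]
  | cons line rest ih =>
    intro fb
    simp only [efbGo, efeLoop1, efeLoop2, show efbSignals = efeSignals from rfl]
    cases hsig : (efeSignals.any fun s => PySem.Str.isIn s line) with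
    | true => simp [efeTrunc]
    | false =>
      simp only [Bool.false_eq_true, if_false]
      by_cases hstrip : PySem.Str.strip line = ""
      · cases fb <;> simp [hstrip, ih]
      · cases fb <;> simp [hstrip, ih, efeTrunc]

-- ===== VERDICT (by name: the statement is the Claim_ definition above) =====
theorem extract_first_error_spec : Claim_equal_extract_first_error := by
  intro lines _
  unfold Spec_extract_first_error extract_first_error extract_first_error_alt
  rw [efbGo_eq]
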